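-- pv_equiv track=rewrite | github.com/GarethFunk/project-euler | pe0049.py | findequispaced
-- ===== SOURCE A (Python) =====
-- def findequispaced(nums):
--     # Start assuming the first number is in the equispaced sequence
--     # We need to find at least three numbers to make it a sequence
--     # If no seqeunce is found, then assume the second number is the
--     # start of an equispaced sequence
--     if len(nums) < 3:
--         return []
--     nums.sort()
--     for i, start in enumerate(nums[:-2]):
--         gaps = []
--         for potential_sequence_member in nums[i+1:]:
--             gaps.append(potential_sequence_member - start)
--         for gap in gaps:
--             if gap*2 in gaps:
--                 # We have found a sequence with gap
--                 return [start, start + gap, start + (2*gap)]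
--     return []
-- ===== SOURCE B (Python) =====
-- def findequispaced(nums):
--     if len(nums) < 3:
--         return []
--     nums.sort()
--     n = len(nums)
--     for i in range(n - 2):
--         a = nums[i]
--         k = 0  # monotone pointer locating the third term in the sorted array
--         for j in range(i + 1, n):
--             target = 2 * nums[j] - a
--             while k < n and nums[k] < target:
--                 k += 1
--             if k < n and nums[k] == target:
--                 return [a, nums[j], target]
--     return []
-- ===== Notes on version B (the rewrite author's own statement) =====
-- stated objective: faster
-- what changed: Replaces A's per-start gaps list and inner quadratic list-membership scan with a two-pointer sweep over the sorted array: for each start one monotone pointer locates the third term 2*b-a, so no gaps list and no membership scan exist at all.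
import Mathlib
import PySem

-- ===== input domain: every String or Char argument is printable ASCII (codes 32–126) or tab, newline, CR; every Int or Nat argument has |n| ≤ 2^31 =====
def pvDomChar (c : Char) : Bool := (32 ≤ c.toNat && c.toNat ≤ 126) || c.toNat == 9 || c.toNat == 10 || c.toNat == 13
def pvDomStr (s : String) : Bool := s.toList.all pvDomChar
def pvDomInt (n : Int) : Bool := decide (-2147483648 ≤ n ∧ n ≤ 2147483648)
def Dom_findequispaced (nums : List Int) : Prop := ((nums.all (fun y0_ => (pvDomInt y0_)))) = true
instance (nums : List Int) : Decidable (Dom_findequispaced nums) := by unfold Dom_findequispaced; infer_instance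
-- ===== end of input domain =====

-- B replaces A's per-start gaps list and inner membership scan with a two-pointer sweep
-- over the sorted array (faster: O(n^2) vs A's O(n^3)).
-- Equivalence is about the RETURN value; both A and B sort the argument list in place.

-- ===== PORT A =====
-- inner loop: 'for gap in gaps: if gap*2 in gaps: return …'
def pvInnerA (gaps : List Int) (allGaps : List Int) (start : Int) : Option (List Int) :=
  match gaps with
  | [] => none
  | g :: rest =>
      if g * 2 ∈ allGaps then some [start, start + g, start + 2 * g]
      else pvInnerA rest allGaps start

-- outer loop: 'for i, start in enumerate(nums[:-2])', gaps built from nums[i+1:]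
def pvOuterA (cur : List Int) : Option (List Int) :=
  match cur with
  | [] => none
  | start :: rest =>
      if rest.length < 2 then none
      else
        let gaps := rest.map (fun x => x - start)
        match pvInnerA gaps gaps start with
        | some r => some r
        | none => pvOuterA rest

def findequispaced (nums : List Int) : List Int :=
  if nums.length < 3 then []
  else (pvOuterA (PySem.List.sorted nums (fun x => x) false)).getD []

-- ===== PORT B =====
-- inner loop over j with the monotone pointer k; the pointer k into the sorted list s is
-- represented by the suffix tl = s[k:], 'while k < n and nums[k] < target: k += 1' is
-- dropWhile, and 'k < n and nums[k] == target' is the head? test.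
def pvTwoPtr (rest tl : List Int) (a : Int) : Option (List Int) :=
  match rest with
  | [] => none
  | b :: t =>
      let tl' := tl.dropWhile (fun x => x < 2 * b - a)
      if tl'.head? = some (2 * b - a) then some [a, b, 2 * b - a]
      else pvTwoPtr t tl' a

-- outer loop: 'for i in range(n - 2)'
def pvOuterB (s : List Int) (cur : List Int) : Option (List Int) :=
  match cur with
  | [] => none
  | a :: rest =>
      if rest.length < 2 then none
      else
        match pvTwoPtr rest s a with
        | some r => some r
        | none => pvOuterB s rest

def findequispaced_alt (nums : List Int) : List Int :=
  if nums.length < 3 then []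
  else
    let s := PySem.List.sorted nums (fun x => x) false
    (pvOuterB s s).getD []

-- ===== PRECONDITION & SPEC =====
def Spec_findequispaced (nums : List Int) (out : List Int) : Prop := out = findequispaced_alt nums
instance (nums : List Int) (out : List Int) : Decidable (Spec_findequispaced nums out) := by unfold Spec_findequispaced; infer_instance

-- ===== CLAIM (what is proved, stated in full; the proofs are below) =====
def Claim_equal_findequispaced : Prop := ∀ (nums : List Int), Dom_findequispaced nums → Spec_findequispaced nums (findequispaced nums)

-- ===== LEMMAS AND PROOFS =====

-- In a sorted list, after dropping everything < t the head is t iff t is in the list.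
lemma pv_head_dropWhile (t : Int) :
    ∀ l : List Int, l.Pairwise (· ≤ ·) →
      (((l.dropWhile (fun x => x < t)).head? = some t) ↔ t ∈ l) := by
  intro l
  induction l with
  | nil => intro _; simp [List.dropWhile]
  | cons x xs ih =>
      intro hp
      have hp' := List.pairwise_cons.mp hp
      by_cases hx : x < t
      · rw [List.dropWhile_cons_of_pos (by simpa using hx)]
        rw [ih hp'.2]
        simp only [List.mem_cons]
        constructor
        · exact Or.inr
        · rintro (he | hm)
          · omega
          · exact hm
      · rw [List.dropWhile_cons_of_neg (by simpa using hx)]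
        simp only [List.head?_cons, Option.some.injEq, List.mem_cons]
        constructor
        · intro h; exact Or.inl h.symm
        · rintro (he | hm)
          · exact he.symm
          · have := hp'.1 t hm; omega

-- On a sorted list s with a::rest a suffix of s and b ∈ rest, the third term 2*b - a
-- lies in rest iff it lies anywhere in s (everything before rest is ≤ a ≤ b ≤ 2*b-a).
lemma pv_mem_third (s rest : List Int) (a b : Int)
    (hps : s.Pairwise (· ≤ ·)) (hsfx : (a :: rest) <:+ s) (hb : b ∈ rest) :
    (2 * b - a ∈ rest) ↔ (2 * b - a ∈ s) := by
  obtain ⟨pre, hpre⟩ := hsfx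
  subst hpre
  have hpw : (a :: rest).Pairwise (· ≤ ·) := (List.pairwise_append.mp hps).2.1
  have hab : a ≤ b := (List.pairwise_cons.mp hpw).1 b hb
  constructor
  · intro h; exact List.mem_append.mpr (Or.inr (List.mem_cons_of_mem _ h))
  · intro h
    rcases List.mem_append.mp h with hl | hr
    · have hle : 2 * b - a ≤ a :=
        (List.pairwise_append.mp hps).2.2 _ hl a (List.mem_cons_self)
      have : 2 * b - a = b := by omega
      rw [this]; exact hb
    · rcases List.mem_cons.mp hr with he | hm
      · have : 2 * b - a = b := by omega
        rw [this]; exact hb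
      · exact hm

-- The two inner loops agree: A's gaps-membership test and B's two-pointer head test
-- both decide '2*b - a ∈ s'.  pre is what the pointer already skipped, all < the
-- coming targets; sub is the remaining part of the j-loop.
lemma pv_twoptr_eq (s rest0 : List Int) (a : Int)
    (hps : s.Pairwise (· ≤ ·)) (hsfx : (a :: rest0) <:+ s) :
    ∀ (sub pre tl : List Int), pre ++ tl = s →
      (∀ x ∈ pre, ∀ b ∈ sub, x < 2 * b - a) → sub <:+ rest0 →
      pvTwoPtr sub tl a
        = pvInnerA (sub.map (fun x => x - a)) (rest0.map (fun x => x - a)) a := by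
  intro sub
  induction sub with
  | nil => intro pre tl _ _ _; simp [pvTwoPtr, pvInnerA]
  | cons b t ih =>
      intro pre tl hsplit hpre hsub
      have hbmem : b ∈ rest0 := hsub.subset List.mem_cons_self
      have htl_sorted : tl.Pairwise (· ≤ ·) := by
        have h : List.Sublist tl s := (List.IsSuffix.sublist ⟨pre, hsplit⟩)
        exact List.Pairwise.sublist h hps
      -- head test ↔ 2*b-a ∈ tl
      have h1 : ((tl.dropWhile (fun x => x < 2 * b - a)).head? = some (2 * b - a))
          ↔ 2 * b - a ∈ tl := pv_head_dropWhile _ tl htl_sorted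
      -- 2*b-a ∈ tl ↔ 2*b-a ∈ s
      have h2 : (2 * b - a ∈ tl) ↔ 2 * b - a ∈ s := by
        rw [← hsplit]
        simp only [List.mem_append]
        constructor
        · exact Or.inr
        · rintro (hl | hr)
          · have := hpre _ hl b List.mem_cons_self; omega
          · exact hr
      -- A's membership test
      have hmemA : ((b - a) * 2 ∈ rest0.map (fun x => x - a)) ↔ (2 * b - a ∈ rest0) := by
        simp only [List.mem_map]
        constructor
        · rintro ⟨y, hy, he⟩
          have : y = 2 * b - a := by omega
          rw [← this]; exact hy
        · intro hy; exact ⟨2 * b - a, hy, by ring⟩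
      have hiff : ((b - a) * 2 ∈ rest0.map (fun x => x - a)) ↔
          ((tl.dropWhile (fun x => x < 2 * b - a)).head? = some (2 * b - a)) := by
        rw [hmemA, pv_mem_third s rest0 a b hps hsfx hbmem, h1, h2]
      simp only [List.map_cons, pvTwoPtr, pvInnerA]
      by_cases hc : (tl.dropWhile (fun x => x < 2 * b - a)).head? = some (2 * b - a)
      · rw [if_pos hc, if_pos (hiff.mpr hc)]
        have h3 : a + (b - a) = b := by ring
        have h4 : a + 2 * (b - a) = 2 * b - a := by ring
        rw [h3, h4]
      · rw [if_neg hc, if_neg (fun h => hc (hiff.mp h))]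
        -- recurse with the advanced pointer
        have hsplit' : (pre ++ tl.takeWhile (fun x => x < 2 * b - a))
            ++ tl.dropWhile (fun x => x < 2 * b - a) = s := by
          rw [List.append_assoc, List.takeWhile_append_dropWhile, hsplit]
        have hble : ∀ b' ∈ t, b ≤ b' := by
          have h5 : List.Sublist (b :: t) s :=
            hsub.sublist.trans ((List.suffix_cons a rest0).trans hsfx).sublist
          have hsb : (b :: t).Pairwise (· ≤ ·) := List.Pairwise.sublist h5 hps
          exact (List.pairwise_cons.mp hsb).1
        have hpre' : ∀ x ∈ pre ++ tl.takeWhile (fun x => x < 2 * b - a),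
            ∀ b' ∈ t, x < 2 * b' - a := by
          intro x hx b' hb'
          rcases List.mem_append.mp hx with hxl | hxr
          · exact hpre x hxl b' (List.mem_cons_of_mem _ hb')
          · have hlt : x < 2 * b - a := by
              have := List.mem_takeWhile_imp hxr; simpa using this
            have := hble b' hb'; omega
        have hsub' : t <:+ rest0 := (List.suffix_cons b t).trans hsub
        exact ih _ _ hsplit' hpre' hsub'

lemma pv_outer_eq (s : List Int) (hps : s.Pairwise (· ≤ ·)) :
    ∀ cur : List Int, cur <:+ s → pvOuterA cur = pvOuterB s cur := by
  intro cur
  induction cur with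
  | nil => intro _; simp [pvOuterA, pvOuterB]
  | cons a rest ih =>
      intro hsfx
      simp only [pvOuterA, pvOuterB]
      by_cases hlen : rest.length < 2
      · rw [if_pos hlen, if_pos hlen]
      · rw [if_neg hlen, if_neg hlen]
        rw [pv_twoptr_eq s rest a hps hsfx rest [] s (by simp)
              (by intro x hx; simp at hx) (List.suffix_refl _)]
        have hrest : rest <:+ s := (List.suffix_cons a rest).trans hsfx
        rw [ih hrest]

-- ===== VERDICT (by name: the statement is the Claim_ definition above) =====
theorem findequispaced_spec : Claim_equal_findequispaced := by
  intro nums _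
  unfold Spec_findequispaced findequispaced findequispaced_alt
  by_cases h : nums.length < 3
  · rw [if_pos h, if_pos h]
  · rw [if_neg h, if_neg h]
    have hps : (PySem.List.sorted nums (fun x => x) false).Pairwise (· ≤ ·) := by
      have := PySem.List.sorted_pairwise (xs := nums) (key := fun x => x)
      simpa using this
    rw [pv_outer_eq _ hps _ (List.suffix_refl _)]
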